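-- pv_equiv track=rewrite | github.com/PacoPakkun/education | year3/audio-video-processing/lab3/decoder.py | entropy_decoding
-- ===== SOURCE A (Python) =====
-- def revert_zigzag(array):
--     block = [[0 for _ in range(8)] for _ in range(8)]
--     for line in range(1, 16):
--         start_col = max(0, line - 8)
--         count = min(line, (8 - start_col), 8)
--         aux, array = array[:count], array[count:]
--         if line % 2 == 0:
--             aux.reverse()
--         for j in range(0, count):
--             block[min(8, line) - j - 1][start_col + j] = aux[j]
--     return block
--
-- def entropy_decoding(array):
--     y, u, v = [[] for _ in range(75)], [[] for _ in range(75)], [[] for _ in range(75)]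
--     count = 0
--     block = []
--     for i in range(len(array)):
--         if len(array[i]) == 1 and len(block) != 0:
--             block += [0 for _ in range(64 - len(block))]
--             if count % 3 == 0:
--                 y[int(count / 300)].append(revert_zigzag(block))
--             if count % 3 == 1:
--                 u[int(count / 300)].append(revert_zigzag(block))
--             if count % 3 == 2:
--                 v[int(count / 300)].append(revert_zigzag(block))
--             count += 1
--             block = []
--         if len(array[i]) == 2:
--             if len(block) != 0:
--                 block += [0 for _ in range(64 - len(block))]
--                 if count % 3 == 0:
--                     y[int(count / 300)].append(revert_zigzag(block))
--                 if count % 3 == 1: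
--                     u[int(count / 300)].append(revert_zigzag(block))
--                 if count % 3 == 2:
--                     v[int(count / 300)].append(revert_zigzag(block))
--                 count += 1
--                 block = []
--             block.append(array[i][1])
--         if len(array[i]) == 3:
--             block += [0 for _ in range(array[i][0])]
--             block.append(array[i][2])
--     return y, u, v
-- ===== SOURCE B (Python) =====
-- # Two-pass re-implementation: first collect the completed 64-length blocks,
-- # then route them to Y/U/V by block index.
-- def revert_zigzag(array):
--     block = [[0 for _ in range(8)] for _ in range(8)]
--     for line in range(1, 16):
--         start_col = max(0, line - 8)
--         count = min(line, (8 - start_col), 8)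
--         aux, array = array[:count], array[count:]
--         if line % 2 == 0:
--             aux.reverse()
--         for j in range(0, count):
--             block[min(8, line) - j - 1][start_col + j] = aux[j]
--     return block
--
-- def entropy_decoding(array):
--     # pass 1: collect every completed block, zero-padded to 64 entries
--     blocks = []
--     cur = []
--     for token in array:
--         n = len(token)
--         if (n == 1 or n == 2) and len(cur) != 0:
--             blocks.append(cur + [0] * (64 - len(cur)))
--             cur = []
--         if n == 2:
--             cur = [token[1]]
--         elif n == 3:
--             cur = cur + [0] * token[0] + [token[2]]
--     # the trailing partial block is never emitted (as in the original decoder)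
--     # pass 2: route block number `count` to channel count % 3, frame count // 300
--     y = [[] for _ in range(75)]
--     u = [[] for _ in range(75)]
--     v = [[] for _ in range(75)]
--     channels = (y, u, v)
--     count = 0
--     for block in blocks:
--         channels[count % 3][count // 300].append(revert_zigzag(block))
--         count += 1
--     return y, u, v
-- ===== Notes on version B (the rewrite author's own statement) =====
-- stated objective: alternative
-- what changed: A interleaves block completion with channel routing in one loop whose flush-and-dispatch code is repeated in three branches; B is two passes: first collect the ordered list of completed 64-length blocks (dropping the trailing partial block as A does), then route block number count to channel count%3 and frame count//300.
import Mathlib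
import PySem

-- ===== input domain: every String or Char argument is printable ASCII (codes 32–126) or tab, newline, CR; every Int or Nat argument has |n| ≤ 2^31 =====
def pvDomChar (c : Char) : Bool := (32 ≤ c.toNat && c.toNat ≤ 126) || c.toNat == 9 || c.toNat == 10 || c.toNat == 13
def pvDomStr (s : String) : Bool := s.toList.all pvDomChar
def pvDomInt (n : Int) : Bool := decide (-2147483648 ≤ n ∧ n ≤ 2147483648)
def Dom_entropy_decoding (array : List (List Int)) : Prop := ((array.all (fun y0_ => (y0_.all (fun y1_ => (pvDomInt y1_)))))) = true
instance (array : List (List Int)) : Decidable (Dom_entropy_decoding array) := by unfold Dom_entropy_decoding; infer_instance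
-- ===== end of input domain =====

-- B re-implements the decoder as two passes (collect completed blocks, then route them); same cost, proved equal to A wherever A returns (Pre_ excludes exactly the block counts on which Python A raises IndexError).


abbrev YUV : Type := List (List (List (List Int))) × List (List (List (List Int))) × List (List (List (List Int)))

-- ===== PORT A =====
-- shared helper (identical in Source A and Source B); `aux.getD j 0` is exact because both
-- entry functions only call it with blocks of length ≥ 64, so aux has length `count`.
-- `List.range' 1 15` transliterates `range(1, 16)` (all values are nonnegative).
def revert_zigzag (array : List Int) : List (List Int) :=
  let block0 := List.replicate 8 (List.replicate 8 (0 : Int))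
  ((List.range' 1 15).foldl
    (fun (st : List (List Int) × List Int) line =>
      let block := st.1
      let arr := st.2
      let start_col := max 0 (line - 8)
      let count := min line (min (8 - start_col) 8)
      let aux := arr.take count
      let arr := arr.drop count
      let aux := if line % 2 == 0 then aux.reverse else aux
      let block := (List.range count).foldl
        (fun b j => b.modify (min 8 line - j - 1)
          (fun row => row.set (start_col + j) (aux.getD j 0))) block
      (block, arr))
    (block0, array)).1

-- the triply-repeated flush code of A: pad to 64 and append to the channel picked by count % 3
-- (Nat division `count / 300` is exact for `int(count/300)` on the admitted counts).
def pushA (yuv : YUV) (count : Nat) (block : List Int) : YUV :=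
  let y := yuv.1
  let u := yuv.2.1
  let v := yuv.2.2
  let y := if count % 3 == 0 then y.modify (count / 300) (fun fr => fr ++ [revert_zigzag block]) else y
  let u := if count % 3 == 1 then u.modify (count / 300) (fun fr => fr ++ [revert_zigzag block]) else u
  let v := if count % 3 == 2 then v.modify (count / 300) (fun fr => fr ++ [revert_zigzag block]) else v
  (y, u, v)

-- A's loop body, one token at a time (state = ((y,u,v), count), block)
def stepA (st : (YUV × Nat) × List Int) (t : List Int) : (YUV × Nat) × List Int :=
  let yuv := st.1.1
  let count := st.1.2
  let block := st.2
  let s1 : (YUV × Nat) × List Int :=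
    if t.length == 1 && block.length != 0 then
      let block := block ++ List.replicate (64 - block.length) (0 : Int)
      ((pushA yuv count block, count + 1), ([] : List Int))
    else ((yuv, count), block)
  let s2 : (YUV × Nat) × List Int :=
    if t.length == 2 then
      let s1' : (YUV × Nat) × List Int :=
        if s1.2.length != 0 then
          let block := s1.2 ++ List.replicate (64 - s1.2.length) (0 : Int)
          ((pushA s1.1.1 s1.1.2 block, s1.1.2 + 1), ([] : List Int))
        else s1
      (s1'.1, s1'.2 ++ [t.getD 1 0])
    else s1
  if t.length == 3 then
    (s2.1, s2.2 ++ List.replicate (t.getD 0 0).toNat 0 ++ [t.getD 2 0])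
  else s2

def entropy_decoding (array : List (List Int)) : List (List (List (List Int))) × List (List (List (List Int))) × List (List (List (List Int))) :=
  let init : YUV := (List.replicate 75 [], List.replicate 75 [], List.replicate 75 [])
  (array.foldl stepA ((init, 0), [])).1.1

-- ===== PORT B =====
-- pass 1 loop body: collect completed, 64-padded blocks
def stepB (st : List (List Int) × List Int) (t : List Int) : List (List Int) × List Int :=
  let blocks := st.1
  let cur := st.2
  let n := t.length
  let s1 : List (List Int) × List Int :=
    if (n == 1 || n == 2) && cur.length != 0 then
      (blocks ++ [cur ++ List.replicate (64 - cur.length) (0 : Int)], ([] : List Int))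
    else (blocks, cur)
  if n == 2 then (s1.1, [t.getD 1 0])
  else if n == 3 then (s1.1, s1.2 ++ List.replicate (t.getD 0 0).toNat 0 ++ [t.getD 2 0])
  else s1

-- pass 2 loop body: route one block and advance the counter
def routeStep2 (st : YUV × Nat) (block : List Int) : YUV × Nat :=
  let y := st.1.1
  let u := st.1.2.1
  let v := st.1.2.2
  let count := st.2
  let yuv : YUV :=
    if count % 3 == 0 then (y.modify (count / 300) (fun fr => fr ++ [revert_zigzag block]), u, v)
    else if count % 3 == 1 then (y, u.modify (count / 300) (fun fr => fr ++ [revert_zigzag block]), v)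
    else (y, u, v.modify (count / 300) (fun fr => fr ++ [revert_zigzag block]))
  (yuv, count + 1)

def entropy_decoding_alt (array : List (List Int)) : List (List (List (List Int))) × List (List (List (List Int))) × List (List (List (List Int))) :=
  let blocks := (array.foldl stepB ([], [])).1
  let init : YUV := (List.replicate 75 [], List.replicate 75 [], List.replicate 75 [])
  (blocks.foldl routeStep2 (init, 0)).1

-- ===== PRECONDITION & SPEC =====
-- number of blocks the decoder completes: a flush happens at a length-1 or length-2
-- token whenever the current block is nonempty; the Bool tracks nonemptiness.
def pvFlushCount (array : List (List Int)) : Nat :=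
  (array.foldl
    (fun (st : Nat × Bool) t =>
      let n := t.length
      let st := if (n == 1 || n == 2) && st.2 then (st.1 + 1, false) else st
      if n == 2 || n == 3 then (st.1, true) else st)
    (0, false)).1

-- Pre_ excludes exactly the inputs on which Python A raises: when the number of completed
-- blocks exceeds 22500 the counter reaches 22500 at a flush and `y[int(count/300)]`
-- indexes y[75], an IndexError; on every other input A returns normally.
def Pre_entropy_decoding (array : List (List Int)) : Prop := pvFlushCount array ≤ 22500
instance (array : List (List Int)) : Decidable (Pre_entropy_decoding array) := by unfold Pre_entropy_decoding; infer_instance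
def pvWitness_entropy_decoding : List (List Int) := [[0, 5], [1, 0, 3], [0], [2, -1], [0]]
def Spec_entropy_decoding (array : List (List Int)) (out : List (List (List (List Int))) × List (List (List (List Int))) × List (List (List (List Int)))) : Prop := out = entropy_decoding_alt array
instance (array : List (List Int)) (out : List (List (List (List Int))) × List (List (List (List Int))) × List (List (List (List Int)))) : Decidable (Spec_entropy_decoding array out) := by unfold Spec_entropy_decoding; infer_instance

-- ===== CLAIM (what is proved, stated in full; the proofs are below) =====
def Claim_equal_entropy_decoding : Prop := ∀ (array : List (List Int)), Dom_entropy_decoding array → Pre_entropy_decoding array → Spec_entropy_decoding array (entropy_decoding array)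

-- ===== LEMMAS AND PROOFS =====

-- the yuv-update of a single flush in A equals one routing step of B
theorem push_route (yuv : YUV) (k : Nat) (b : List Int) :
    routeStep2 (yuv, k) b = (pushA yuv k b, k + 1) := by
  have h3 : k % 3 = 0 ∨ k % 3 = 1 ∨ k % 3 = 2 := by omega
  rcases h3 with h | h | h <;> simp [routeStep2, pushA, h]

-- one A-step equals: emit this token's blocks (pass 1 on one token) and route them
theorem stepA_eq (yuv : YUV) (k : Nat) (cur : List Int) (t : List Int) :
    stepA ((yuv, k), cur) t =
      ((stepB ([], cur) t).1.foldl routeStep2 (yuv, k), (stepB ([], cur) t).2) := by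
  simp only [stepA, stepB]
  split_ifs <;> simp_all [push_route]

-- pass 1 only appends to `blocks`
theorem stepB_accum (p : List (List Int) × List Int) (t : List Int) :
    stepB p t = (p.1 ++ (stepB ([], p.2) t).1, (stepB ([], p.2) t).2) := by
  obtain ⟨bs, cur⟩ := p
  simp only [stepB]
  split_ifs <;> simp

theorem foldl_stepB_accum (arr : List (List Int)) :
    ∀ (p : List (List Int) × List Int),
      arr.foldl stepB p = (p.1 ++ (arr.foldl stepB ([], p.2)).1, (arr.foldl stepB ([], p.2)).2) := by
  induction arr with
  | nil => intro p; simp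
  | cons t arr ih =>
    intro p
    simp only [List.foldl_cons]
    rw [stepB_accum p t, ih, ih (stepB ([], p.2) t), List.append_assoc]

-- main invariant: folding A over the input = pass 1 then pass 2 of B
theorem foldA_eq (arr : List (List Int)) :
    ∀ (s : YUV × Nat) (cur : List Int),
      arr.foldl stepA (s, cur) =
        ((arr.foldl stepB ([], cur)).1.foldl routeStep2 s, (arr.foldl stepB ([], cur)).2) := by
  induction arr with
  | nil => intro s cur; simp
  | cons t arr ih =>
    intro s cur
    simp only [List.foldl_cons]
    rw [show stepA ((s.1, s.2), cur) t =
          ((stepB ([], cur) t).1.foldl routeStep2 (s.1, s.2), (stepB ([], cur) t).2) from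
        stepA_eq s.1 s.2 cur t, ih, foldl_stepB_accum arr (stepB ([], cur) t),
        List.foldl_append]

-- ===== VERDICT (by name: the statement is the Claim_ definition above) =====
theorem entropy_decoding_spec : Claim_equal_entropy_decoding := by
  unfold Claim_equal_entropy_decoding
  intro array _ _
  unfold Spec_entropy_decoding entropy_decoding entropy_decoding_alt
  simp only [foldA_eq]
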